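-- pv_equiv track=rewrite | github.com/soosbk/KMU | computer_network/protocolScenerio/function_zip.py | making_bitstream
-- ===== SOURCE A (Python) =====
-- def making_bitstream(ascii_str):
-- 	out_stream=""
-- 	for i in range(0,len(ascii_str)):
-- 		n=ord(ascii_str[i])
-- 		s=""
-- 		while True:
-- 			if n==0: break
-- 			s=str(n&0x01)+s
-- 			n=n>>1
-- 		#if len(s)<8: s="0"*(8-len(s))+s
-- 		out_stream+=s
--
-- 	return out_stream
-- ===== SOURCE B (Python) =====
-- def making_bitstream(ascii_str):
--     return "".join(format(ord(c), 'b') for c in ascii_str)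
-- ===== Notes on version B (the rewrite author's own statement) =====
-- stated objective: idiomatic
-- what changed: Replaces the manual per-character LSB-extraction while-loop and repeated string concatenation with a single join over per-character built-in binary conversions.
import Mathlib
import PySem

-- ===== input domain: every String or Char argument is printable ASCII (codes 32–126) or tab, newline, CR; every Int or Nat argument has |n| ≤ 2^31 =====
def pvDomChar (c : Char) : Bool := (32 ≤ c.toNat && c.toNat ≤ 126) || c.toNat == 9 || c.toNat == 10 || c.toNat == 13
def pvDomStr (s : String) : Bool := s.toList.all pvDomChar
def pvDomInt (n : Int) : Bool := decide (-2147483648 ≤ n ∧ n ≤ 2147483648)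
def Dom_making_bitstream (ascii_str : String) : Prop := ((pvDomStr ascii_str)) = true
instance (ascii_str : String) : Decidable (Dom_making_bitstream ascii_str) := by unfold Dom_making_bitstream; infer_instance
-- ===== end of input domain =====

-- B replaces A's per-character LSB-extraction while-loop and += concatenation by a join of
-- built-in binary conversions (format(ord(c),'b')); idiomatic, same extensional behaviour on Dom.


-- ===== PORT A =====
-- inner 'while True: if n==0: break; s=str(n&1)+s; n=n>>1'
def aBitLoop (n : Nat) (s : List Char) : List Char :=
  if n = 0 then s
  else aBitLoop (n >>> 1) (PySem.Int.toChars ((n &&& 1 : Nat) : Int) ++ s)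
termination_by n
decreasing_by simpa [Nat.shiftRight_succ] using Nat.div_lt_self (Nat.pos_of_ne_zero (by assumption)) (by omega)

def making_bitstream (ascii_str : String) : String :=
  String.mk (ascii_str.toList.foldl (fun acc c => acc ++ aBitLoop c.toNat []) [])

-- ===== PORT B =====
-- hand port of format(n,'b') for n ≥ 0 (exact: msb-first binary digits, '0' for 0)
def fmtBin (n : Nat) : List Char :=
  if n < 2 then [Char.ofNat (48 + n)]
  else fmtBin (n / 2) ++ [Char.ofNat (48 + n % 2)]
termination_by n
decreasing_by exact Nat.div_lt_self (by omega) (by omega)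

def making_bitstream_alt (ascii_str : String) : String :=
  String.mk (ascii_str.toList.flatMap (fun c => fmtBin c.toNat))

-- ===== PRECONDITION & SPEC =====
def Spec_making_bitstream (ascii_str : String) (out : String) : Prop := out = making_bitstream_alt ascii_str
instance (ascii_str : String) (out : String) : Decidable (Spec_making_bitstream ascii_str out) := by unfold Spec_making_bitstream; infer_instance

-- ===== CLAIM (what is proved, stated in full; the proofs are below) =====
def Claim_equal_making_bitstream : Prop := ∀ (ascii_str : String), Dom_making_bitstream ascii_str → Spec_making_bitstream ascii_str (making_bitstream ascii_str)

-- ===== LEMMAS AND PROOFS =====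
lemma toChars_zero : PySem.Int.toChars 0 = ['0'] := rfl
lemma toChars_one : PySem.Int.toChars 1 = ['1'] := rfl

lemma aBitLoop_eq_fmtBin : ∀ n, 0 < n → ∀ s, aBitLoop n s = fmtBin n ++ s := by
  intro n
  induction n using Nat.strong_induction_on with
  | _ n ih =>
    intro hn s
    have hne : n ≠ 0 := by omega
    rw [aBitLoop, if_neg hne]
    by_cases h2 : n < 2
    · have h1 : n = 1 := by omega
      subst h1
      rw [show (1:Nat) >>> 1 = 0 from rfl, show (1:Nat) &&& 1 = 1 from rfl,
        aBitLoop, if_pos rfl]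
      simp [fmtBin, toChars_one]
    · have hd : 0 < n / 2 := Nat.div_pos (by omega) (by omega)
      rw [Nat.shiftRight_one, Nat.and_one_is_mod]
      rw [ih (n / 2) (Nat.div_lt_self hn (by omega)) hd]
      have hfm : fmtBin n = fmtBin (n / 2) ++ [Char.ofNat (48 + n % 2)] := by
        rw [fmtBin]; exact if_neg h2
      rw [hfm]
      rcases Nat.mod_two_eq_zero_or_one n with h | h
      · rw [h]; simp [toChars_zero, show Char.ofNat (48 + 0) = '0' from rfl]
      · rw [h]; simp [toChars_one, show Char.ofNat (48 + 1) = '1' from rfl]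

lemma flatMap_congr_dom (l : List Char) (h : ∀ c ∈ l, pvDomChar c = true) :
    l.flatMap (fun c => aBitLoop c.toNat []) = l.flatMap (fun c => fmtBin c.toNat) := by
  induction l with
  | nil => rfl
  | cons c l ih =>
    have hc : 0 < c.toNat := by
      have := h c (List.mem_cons_self ..)
      simp [pvDomChar] at this
      omega
    simp only [List.flatMap_cons, ih (fun x hx => h x (List.mem_cons_of_mem _ hx))]
    rw [aBitLoop_eq_fmtBin _ hc]
    simp

-- ===== VERDICT (by name: the statement is the Claim_ definition above) =====
theorem making_bitstream_spec : Claim_equal_making_bitstream := by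
  intro s hdom
  unfold Spec_making_bitstream making_bitstream making_bitstream_alt
  rw [PySem.List.foldl_append_eq_flatMap]
  rw [flatMap_congr_dom]
  · rfl
  · intro c hc
    exact List.all_eq_true.mp hdom c hc
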